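-- pv_equiv track=rewrite | github.com/cxygiao/Transmission-Cost-Optimization-Dynamic-Look-Ahead | Utils/transmission_cost_calculation_2.py | update_transfer_qubit_list
-- ===== SOURCE A (Python) =====
-- import copy
--
-- def update_transfer_qubit_list(transfer_qubit_list,transfer_queue):
--     count = 0
--     for i in range(len(transfer_queue)):
--         count += len(transfer_queue[i])
--         if len(transfer_queue[i]) == 1:
--             continue
--         if len(transfer_queue[i]) > 1:
--             for j in range(count-len(transfer_queue[i])+1,count):
--                 transfer_qubit_list[j] = copy.deepcopy(transfer_qubit_list[count-len(transfer_queue[i])])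
--     return transfer_qubit_list
-- ===== SOURCE B (Python) =====
-- import copy
--
-- def update_transfer_qubit_list(transfer_qubit_list, transfer_queue):
--     # pass 1: block-start positions = prefix sums of the group lengths
--     starts = set()
--     total = 0
--     for group in transfer_queue:
--         starts.add(total)
--         total += len(group)
--     # pass 2: one flat loop over all positions, tracking the current block head
--     src = 0
--     for pos in range(total):
--         if pos in starts:
--             src = pos
--         else:
--             transfer_qubit_list[pos] = copy.deepcopy(transfer_qubit_list[src])
--     return transfer_qubit_list
-- ===== Notes on version B (the rewrite author's own statement) =====
-- stated objective: alternative
-- what changed: Replaces A's nested loops (outer over groups, inner over each group's tail positions) by a two-phase decomposition: one pass over transfer_queue builds the set of block-start positions via prefix sums, then a single flat loop over positions 0..total-1 copies from the current block head tracked in a variable.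
import Mathlib
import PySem

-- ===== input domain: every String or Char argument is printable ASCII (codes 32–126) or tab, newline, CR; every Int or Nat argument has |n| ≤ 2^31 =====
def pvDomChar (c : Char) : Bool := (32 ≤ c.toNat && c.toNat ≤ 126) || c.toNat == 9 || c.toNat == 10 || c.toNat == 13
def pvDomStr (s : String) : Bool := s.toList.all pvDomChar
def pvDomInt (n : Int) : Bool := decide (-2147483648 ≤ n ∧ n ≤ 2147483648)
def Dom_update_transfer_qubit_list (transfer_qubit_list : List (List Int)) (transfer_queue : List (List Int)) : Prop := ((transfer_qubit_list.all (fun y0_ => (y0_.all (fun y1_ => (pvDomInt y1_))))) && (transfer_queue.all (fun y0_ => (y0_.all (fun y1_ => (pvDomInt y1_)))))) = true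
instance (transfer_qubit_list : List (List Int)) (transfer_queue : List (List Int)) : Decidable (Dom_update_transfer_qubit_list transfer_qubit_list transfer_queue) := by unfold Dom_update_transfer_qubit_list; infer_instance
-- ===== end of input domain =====

-- B replaces A's nested group/inner-range loops by a prefix-sum pass building the block-start
-- set followed by one flat loop over all positions (alternative decomposition, same cost).
-- Both A and B mutate transfer_qubit_list in place identically; the equivalence proved is about the return value.

-- ===== PORT A =====
def update_transfer_qubit_list (transfer_qubit_list : List (List Int)) (transfer_queue : List (List Int)) : List (List Int) :=
  ((PySem.List.pyRange 0 (transfer_queue.length : Int) 1).foldl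
    (fun (st : Int × List (List Int)) i =>
      let g := PySem.List.pyGetD transfer_queue i []
      let count := st.1 + (g.length : Int)
      if (g.length : Int) == 1 then (count, st.2)
      else if (g.length : Int) > 1 then
        (count,
          (PySem.List.pyRange (count - (g.length : Int) + 1) count 1).foldl
            (fun lst j =>
              PySem.List.pySetD lst j (PySem.List.pyGetD lst (count - (g.length : Int)) []))
            st.2)
      else (count, st.2))
    (0, transfer_qubit_list)).2

-- ===== PORT B =====
def update_transfer_qubit_list_alt (transfer_qubit_list : List (List Int)) (transfer_queue : List (List Int)) : List (List Int) :=
  let p := transfer_queue.foldl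
    (fun (st : PySem.Set Int × Int) g => (PySem.Set.add st.1 st.2, st.2 + (g.length : Int)))
    (PySem.Set.empty, 0)
  ((PySem.List.pyRange 0 p.2 1).foldl
    (fun (st : Int × List (List Int)) pos =>
      if PySem.Set.contains p.1 pos then (pos, st.2)
      else (st.1, PySem.List.pySetD st.2 pos (PySem.List.pyGetD st.2 st.1 [])))
    (0, transfer_qubit_list)).2

-- ===== PRECONDITION & SPEC =====
-- Pre_ excludes exactly the inputs on which the Python A raises IndexError: some group of
-- length ≥ 2 covers a position at or beyond the end of transfer_qubit_list.
def Pre_update_transfer_qubit_list (transfer_qubit_list : List (List Int)) (transfer_queue : List (List Int)) : Prop :=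
  ∀ i < transfer_queue.length, 2 ≤ (transfer_queue.getD i []).length →
    (((transfer_queue.take (i+1)).map List.length).sum ≤ transfer_qubit_list.length)
instance (transfer_qubit_list : List (List Int)) (transfer_queue : List (List Int)) : Decidable (Pre_update_transfer_qubit_list transfer_qubit_list transfer_queue) := by unfold Pre_update_transfer_qubit_list; infer_instance

def pvWitness_update_transfer_qubit_list : List (List Int) × List (List Int) :=
  ([[1], [2], [3]], [[0, 0], [5]])

def Spec_update_transfer_qubit_list (transfer_qubit_list : List (List Int)) (transfer_queue : List (List Int)) (out : List (List Int)) : Prop := out = update_transfer_qubit_list_alt transfer_qubit_list transfer_queue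
instance (transfer_qubit_list : List (List Int)) (transfer_queue : List (List Int)) (out : List (List Int)) : Decidable (Spec_update_transfer_qubit_list transfer_qubit_list transfer_queue out) := by unfold Spec_update_transfer_qubit_list; infer_instance

-- ===== CLAIM (what is proved, stated in full; the proofs are below) =====
def Claim_equal_update_transfer_qubit_list : Prop := ∀ (transfer_qubit_list : List (List Int)) (transfer_queue : List (List Int)), Dom_update_transfer_qubit_list transfer_qubit_list transfer_queue → Pre_update_transfer_qubit_list transfer_qubit_list transfer_queue → Spec_update_transfer_qubit_list transfer_qubit_list transfer_queue (update_transfer_qubit_list transfer_qubit_list transfer_queue)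

-- ===== LEMMAS AND PROOFS =====

-- A's per-group step (the body of A's outer loop, on the group itself).
def pvStepA (st : Int × List (List Int)) (g : List Int) : Int × List (List Int) :=
  let count := st.1 + (g.length : Int)
  if (g.length : Int) == 1 then (count, st.2)
  else if (g.length : Int) > 1 then
    (count,
      (PySem.List.pyRange (count - (g.length : Int) + 1) count 1).foldl
        (fun lst j => PySem.List.pySetD lst j (PySem.List.pyGetD lst (count - (g.length : Int)) []))
        st.2)
  else (count, st.2)

-- B's per-position step, for a fixed start set S.
def pvStepB (S : PySem.Set Int) (st : Int × List (List Int)) (pos : Int) : Int × List (List Int) :=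
  if PySem.Set.contains S pos then (pos, st.2)
  else (st.1, PySem.List.pySetD st.2 pos (PySem.List.pyGetD st.2 st.1 []))

-- Block starts of the groups of q when the first group starts at position c.
def pvStarts (c : Int) : List (List Int) → List Int
  | [] => []
  | g :: rest => c :: pvStarts (c + (g.length : Int)) rest

def pvTot (q : List (List Int)) : Int := (q.map (fun g => ((g.length : Int)))).sum

theorem pvStarts_ge (q : List (List Int)) (c p : Int) (hp : p ∈ pvStarts c q) : c ≤ p := by
  induction q generalizing c with
  | nil => simp [pvStarts] at hp
  | cons g rest ih =>
    simp only [pvStarts, List.mem_cons] at hp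
    rcases hp with rfl | hp
    · exact le_refl _
    · have := ih (c + (g.length : Int)) hp
      omega

theorem pvTot_nonneg (q : List (List Int)) : 0 ≤ pvTot q := by
  induction q with
  | nil => simp [pvTot]
  | cons g rest ih => simp [pvTot] at *; positivity

-- B's first pass computes (as a set) the starts and (as the count) the total.
theorem pvPass1 (q : List (List Int)) (S : PySem.Set Int) (c : Int) :
    (q.foldl (fun (st : PySem.Set Int × Int) g => (PySem.Set.add st.1 st.2, st.2 + (g.length : Int))) (S, c)).2
      = c + pvTot q
    ∧ ∀ p : Int,
      (PySem.Set.contains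
        (q.foldl (fun (st : PySem.Set Int × Int) g => (PySem.Set.add st.1 st.2, st.2 + (g.length : Int))) (S, c)).1 p
        = true ↔ (PySem.Set.contains S p = true ∨ p ∈ pvStarts c q)) := by
  induction q generalizing S c with
  | nil => simp [pvTot, pvStarts]
  | cons g rest ih =>
    simp only [List.foldl_cons]
    obtain ⟨h2, h1⟩ := ih (PySem.Set.add S c) (c + (g.length : Int))
    constructor
    · rw [h2]; simp [pvTot]; ring
    · intro p
      rw [h1 p]
      constructor
      · rintro (h | h)
        · rw [PySem.Set.contains_iff, PySem.Set.mem_add] at h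
          rcases h with h | rfl
          · exact Or.inl (by rwa [PySem.Set.contains_iff])
          · exact Or.inr (by simp [pvStarts])
        · exact Or.inr (by simp [pvStarts, h])
      · rintro (h | h)
        · exact Or.inl (by rw [PySem.Set.contains_iff, PySem.Set.mem_add]; left; rwa [PySem.Set.contains_iff] at h)
        · simp only [pvStarts, List.mem_cons] at h
          rcases h with rfl | h
          · exact Or.inl (by rw [PySem.Set.contains_iff, PySem.Set.mem_add]; right; rfl)
          · exact Or.inr h

-- A flat run of positions none of which is a start just writes, keeping src fixed.
theorem pvNoStart (S : PySem.Set Int) (ps : List Int) (hs : ∀ p ∈ ps, PySem.Set.contains S p = false)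
    (src : Int) (lst : List (List Int)) :
    ps.foldl (pvStepB S) (src, lst)
      = (src, ps.foldl (fun l j => PySem.List.pySetD l j (PySem.List.pyGetD l src [])) lst) := by
  induction ps generalizing lst with
  | nil => rfl
  | cons p ps ih =>
    have h := hs p (by simp)
    have hstep : pvStepB S (src, lst) p
        = (src, PySem.List.pySetD lst p (PySem.List.pyGetD lst src [])) := by
      unfold pvStepB; rw [h]; simp
    rw [List.foldl_cons, hstep, List.foldl_cons]
    exact ih (fun x hx => hs x (by simp [hx])) _

-- Main invariant: B's flat loop over positions [c, c + tot q) equals A's group loop over q.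
theorem pvMain (q : List (List Int)) (S : PySem.Set Int) :
    ∀ (c src : Int) (lst : List (List Int)),
    (∀ p : Int, c ≤ p → p < c + pvTot q → (PySem.Set.contains S p = true ↔ p ∈ pvStarts c q)) →
    ((PySem.List.pyRange c (c + pvTot q) 1).foldl (pvStepB S) (src, lst)).2
      = (q.foldl pvStepA (c, lst)).2 := by
  induction q with
  | nil =>
    intro c src lst _
    have h0 : c + pvTot [] = c := by simp [pvTot]
    rw [h0, PySem.List.pyRange_one_eq_nil (le_refl c)]
    rfl
  | cons g rest ih =>
    intro c src lst H
    have hLnn : (0:Int) ≤ (g.length : Int) := by positivity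
    have hRnn : (0:Int) ≤ pvTot rest := pvTot_nonneg rest
    have hT : c + pvTot (g :: rest) = (c + (g.length : Int)) + pvTot rest := by
      simp [pvTot]; ring
    rw [hT, PySem.List.pyRange_one_append c (c + (g.length : Int)) _ (by omega) (by omega),
        List.foldl_append]
    -- step over this group's segment
    have Hrest : ∀ p : Int, c + (g.length : Int) ≤ p → p < (c + (g.length : Int)) + pvTot rest →
        (PySem.Set.contains S p = true ↔ p ∈ pvStarts (c + (g.length : Int)) rest) := by
      intro p hp1 hp2
      have h := H p (by omega) (by omega)
      rw [h]
      by_cases hL : (g.length : Int) = 0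
      · -- empty group: c is also the start of rest (rest nonempty since p exists)
        have hcp : c = c + (g.length : Int) := by omega
        rcases rest with _ | ⟨r, rs⟩
        · exfalso; simp [pvTot] at hp2; omega
        · simp only [pvStarts, List.mem_cons, ← hcp]
          constructor
          · rintro (rfl | h)
            · left; rfl
            · rcases h with h
              simpa [pvStarts, ← hcp] using h
          · intro h; right; simpa [pvStarts, ← hcp] using h
      · have hpc : c < p := by omega
        simp only [pvStarts, List.mem_cons]
        constructor
        · rintro (rfl | h)
          · omega
          · exact h
        · intro h; right; exact h
    rcases eq_or_lt_of_le hLnn with hL0 | hL1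
    · -- group of length 0: empty segment, A's step does nothing
      rw [PySem.List.pyRange_one_eq_nil (by omega)]
      simp only [List.foldl_nil, List.foldl_cons]
      have hA : pvStepA (c, lst) g = (c + (g.length : Int), lst) := by
        simp [pvStepA]; omega
      rw [hA]
      exact ih (c + (g.length : Int)) src lst Hrest
    · -- group of length ≥ 1: first position c is a start
      rw [PySem.List.pyRange_one_cons (by omega)]
      simp only [List.foldl_cons]
      have hcS : PySem.Set.contains S c = true := by
        rw [H c (le_refl c) (by omega)]; simp [pvStarts]
      have hstep : pvStepB S (src, lst) c = (c, lst) := by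
        unfold pvStepB; rw [hcS]; simp
      rw [hstep]
      have hnostart : ∀ p ∈ PySem.List.pyRange (c+1) (c + (g.length : Int)) 1,
          PySem.Set.contains S p = false := by
        intro p hp
        rw [PySem.List.mem_pyRange_one] at hp
        cases h : PySem.Set.contains S p
        · rfl
        · exfalso
          rw [H p (by omega) (by omega)] at h
          simp only [pvStarts, List.mem_cons] at h
          rcases h with rfl | hmem
          · omega
          · have := pvStarts_ge rest (c + (g.length : Int)) p hmem; omega
      rw [pvNoStart S _ hnostart c lst]
      have hA : (pvStepA (c, lst) g).1 = c + (g.length : Int) := by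
        simp only [pvStepA]; split_ifs <;> rfl
      have hAl : (pvStepA (c, lst) g).2
          = (PySem.List.pyRange (c+1) (c + (g.length : Int)) 1).foldl
              (fun l j => PySem.List.pySetD l j (PySem.List.pyGetD l c [])) lst := by
        simp only [pvStepA]
        by_cases h1 : (g.length : Int) = 1
        · rw [if_pos (by simp [h1])]
          rw [h1, PySem.List.pyRange_one_eq_nil (by omega)]
          rfl
        · rw [if_neg (by simp [h1]), if_pos (by omega)]
          have e1 : c + (g.length : Int) - (g.length : Int) + 1 = c + 1 := by ring
          have e2 : c + (g.length : Int) - (g.length : Int) = c := by ring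
          rw [e1, e2]
      have hAfull : pvStepA (c, lst) g
          = (c + (g.length : Int),
             (PySem.List.pyRange (c+1) (c + (g.length : Int)) 1).foldl
               (fun l j => PySem.List.pySetD l j (PySem.List.pyGetD l c [])) lst) := by
        exact Prod.ext (by simpa using hA) (by simpa using hAl)
      rw [hAfull]
      exact ih (c + (g.length : Int)) c _ Hrest

-- ===== VERDICT (by name: the statement is the Claim_ definition above) =====
theorem update_transfer_qubit_list_spec : Claim_equal_update_transfer_qubit_list := by
  intro l q _ _
  unfold Spec_update_transfer_qubit_list
  unfold update_transfer_qubit_list update_transfer_qubit_list_alt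
  obtain ⟨htot, hmem⟩ := pvPass1 q PySem.Set.empty 0
  change ((PySem.List.pyRange 0 (q.length : Int) 1).foldl
      (fun (st : Int × List (List Int)) i => pvStepA st (PySem.List.pyGetD q i []))
      (0, l)).2
    = ((PySem.List.pyRange 0
          (q.foldl (fun (st : PySem.Set Int × Int) g =>
            (PySem.Set.add st.1 st.2, st.2 + (g.length : Int))) (PySem.Set.empty, 0)).2 1).foldl
        (pvStepB (q.foldl (fun (st : PySem.Set Int × Int) g =>
            (PySem.Set.add st.1 st.2, st.2 + (g.length : Int))) (PySem.Set.empty, 0)).1)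
        (0, l)).2
  rw [htot, PySem.List.foldl_pyRange_zero_pyGetD' q [] pvStepA ((0 : Int), l)]
  exact (pvMain q _ 0 0 l (by intro p _ _; rw [hmem p]; simp [PySem.Set.empty])).symm
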